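-- pv_equiv track=rewrite | github.com/YamiOmar88/product-family-selection | familyedges.py | find_family_paths
-- ===== SOURCE A (Python) =====
-- def find_family_paths(all_paths, family_members):
--     '''Since the family members are path sets and not paths, this
--     function searches for the paths that belong to the family. Input
--     variables:
--     - all_paths: a dictionary with all the paths in the data. Keys are
--     tuples of paths and values are the count of such path.
--     - family_members: a list of path sets that belong to the family
--     under study.
--     The function returns a dictionary (family_paths) with paths as
--     keys and counts as values.'''
--     family_paths = dict()
--     for path, count in all_paths.items():
--         path_set = list(path)
--         path_set.sort()
--         path_set  = tuple(path_set)
--         if path_set in family_members: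
--             family_paths[path] = count
--     return family_paths
-- ===== SOURCE B (Python) =====
-- def find_family_paths(all_paths, family_members):
--     # Family-driven: index paths by their canonical (sorted) form once, collect the
--     # buckets of each distinct family member, then restore the original dict order.
--     index = {}
--     for i, (path, count) in enumerate(all_paths.items()):
--         index.setdefault(tuple(sorted(path)), []).append((i, path, count))
--     collected = []
--     for member in dict.fromkeys(family_members):
--         collected.extend(index.get(member, []))
--     collected.sort(key=lambda entry: entry[0])
--     return {path: count for _, path, count in collected}
-- ===== Notes on version B (the rewrite author's own statement) =====
-- stated objective: faster
-- what changed: Instead of scanning family_members for every path, B builds a one-pass hash index from canonical (sorted) path form to the (position, path, count) entries, collects the buckets of each distinct family member, and re-sorts the hits by original position before assembling the result dict.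
import Mathlib
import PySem

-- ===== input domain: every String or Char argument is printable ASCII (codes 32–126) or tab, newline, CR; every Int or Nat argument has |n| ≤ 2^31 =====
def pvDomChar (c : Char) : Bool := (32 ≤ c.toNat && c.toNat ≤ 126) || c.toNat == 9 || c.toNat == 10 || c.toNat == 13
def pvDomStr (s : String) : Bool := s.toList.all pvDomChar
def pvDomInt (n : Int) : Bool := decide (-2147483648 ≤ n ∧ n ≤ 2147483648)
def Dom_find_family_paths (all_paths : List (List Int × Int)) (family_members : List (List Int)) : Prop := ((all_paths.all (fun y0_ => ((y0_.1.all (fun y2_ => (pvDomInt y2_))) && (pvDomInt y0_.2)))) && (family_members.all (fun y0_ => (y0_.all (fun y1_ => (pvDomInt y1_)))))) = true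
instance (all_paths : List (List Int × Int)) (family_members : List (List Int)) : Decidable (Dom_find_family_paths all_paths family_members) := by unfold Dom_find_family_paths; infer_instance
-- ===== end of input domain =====

-- B replaces A's per-path scan of family_members by a one-pass index keyed on the
-- canonical (sorted) form, driven from the family side; same return value.

-- tuple(sorted(path)) — the canonical form computed by both programs
def pvCanon (p : List Int) : List Int := PySem.List.sorted p (fun x => x)

-- ===== PORT A =====
def find_family_paths (all_paths : List (List Int × Int)) (family_members : List (List Int)) : List (List Int × Int) :=
  (all_paths.foldl
    (fun family_paths pc =>
      let path_set := pvCanon pc.1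
      if family_members.contains path_set then family_paths.insert pc.1 pc.2 else family_paths)
    PySem.Dict.empty).items

-- ===== PORT B =====
def find_family_paths_alt (all_paths : List (List Int × Int)) (family_members : List (List Int)) : List (List Int × Int) :=
  let index : PySem.Dict (List Int) (List (Int × (List Int × Int))) :=
    (PySem.List.enumerate all_paths 0).foldl
      (fun d e => d.modify (pvCanon e.2.1) [] (fun l => l ++ [e]))
      PySem.Dict.empty
  let collected :=
    (PySem.List.dedup family_members).foldl (fun acc m => acc ++ index.getD m []) []
  let sortedc := PySem.List.sorted collected (fun e => e.1)
  (sortedc.foldl (fun d e => d.insert e.2.1 e.2.2) PySem.Dict.empty).items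

-- ===== PRECONDITION & SPEC =====
def Spec_find_family_paths (all_paths : List (List Int × Int)) (family_members : List (List Int)) (out : List (List Int × Int)) : Prop := out = find_family_paths_alt all_paths family_members
instance (all_paths : List (List Int × Int)) (family_members : List (List Int)) (out : List (List Int × Int)) : Decidable (Spec_find_family_paths all_paths family_members out) := by unfold Spec_find_family_paths; infer_instance

-- ===== CLAIM (what is proved, stated in full; the proofs are below) =====
def Claim_equal_find_family_paths : Prop := ∀ (all_paths : List (List Int × Int)) (family_members : List (List Int)), Dom_find_family_paths all_paths family_members → Spec_find_family_paths all_paths family_members (find_family_paths all_paths family_members)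

-- ===== LEMMAS AND PROOFS =====

-- the index's bucket at key m holds exactly the enumerated entries whose canonical form is m
theorem pv_index_getD (E : List (Int × (List Int × Int))) (m : List Int) :
    ((E.foldl (fun d e => d.modify (pvCanon e.2.1) [] (fun l => l ++ [e])) PySem.Dict.empty).getD m [])
      = E.filter (fun e => pvCanon e.2.1 == m) := by
  have h : E.foldl (fun d e => d.modify (pvCanon e.2.1) [] (fun l => l ++ [e])) PySem.Dict.empty
      = (E.map (fun e => (pvCanon e.2.1, e))).foldl
          (fun d p => d.modify p.1 [] (fun l => l ++ [p.2])) PySem.Dict.empty := by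
    rw [List.foldl_map]
  rw [h, PySem.Dict.getD_foldl_modify_append]
  simp [List.filter_map, Function.comp_def]

-- disjoint filters concatenate to the filter of the disjunction, up to permutation
theorem pv_filter_or_perm {α : Type} (p q : α → Bool) (E : List α)
    (h : ∀ e, q e = true → p e = false) :
    (E.filter p ++ E.filter q).Perm (E.filter (fun e => p e || q e)) := by
  have hperm := List.filter_append_perm p (E.filter (fun e => p e || q e))
  have h1 : (E.filter (fun e => p e || q e)).filter p = E.filter p := by
    rw [List.filter_filter]
    apply List.filter_congr
    intro a _
    cases hp : p a <;> simp_all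
  have h2 : (E.filter (fun e => p e || q e)).filter (fun e => !p e) = E.filter q := by
    rw [List.filter_filter]
    apply List.filter_congr
    intro a _
    cases hq : q a
    · cases hp : p a <;> simp_all
    · have := h a hq
      simp [this]
  rw [h1, h2] at hperm
  exact hperm

-- concatenating the buckets of distinct keys is a permutation of filtering by membership
theorem pv_flatMap_filter_perm {α κ : Type} [BEq κ] [LawfulBEq κ] (key : α → κ) (E : List α) :
    ∀ (ms : List κ), ms.Nodup →
      (ms.flatMap (fun m => E.filter (fun e => key e == m))).Perm
        (E.filter (fun e => ms.contains (key e))) := by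
  intro ms
  induction ms with
  | nil => simp
  | cons m ms ih =>
    intro hnd
    rcases List.nodup_cons.mp hnd with ⟨hm, hnd'⟩
    have hdisj : ∀ e, (ms.contains (key e)) = true → (key e == m) = false := by
      intro e hc
      by_contra hne
      have : key e = m := by
        cases h' : (key e == m) with
        | false => exact absurd h' hne
        | true => exact eq_of_beq h'
      exact hm (this ▸ (List.contains_iff_mem.mp hc))
    have hstep := pv_filter_or_perm (fun e => key e == m) (fun e => ms.contains (key e)) E hdisj
    have hgoal : E.filter (fun e => (m :: ms).contains (key e))
        = E.filter (fun e => (key e == m) || ms.contains (key e)) := by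
      apply List.filter_congr
      intro a _
      simp
    rw [List.flatMap_cons, hgoal]
    exact ((ih hnd').append_left _).trans hstep

-- the loop over enumerated, filtered entries builds A's dict
theorem pv_foldl_insert_filter (family_members : List (List Int)) :
    ∀ (ap : List (List Int × Int)) (s : Int) (d : PySem.Dict (List Int) Int),
    ((PySem.List.enumerate ap s).filter
        (fun e => family_members.contains (pvCanon e.2.1))).foldl
      (fun d e => d.insert e.2.1 e.2.2) d
    = ap.foldl
        (fun family_paths pc =>
          let path_set := pvCanon pc.1
          if family_members.contains path_set then family_paths.insert pc.1 pc.2 else family_paths)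
        d := by
  intro ap
  induction ap with
  | nil => intro s d; simp [PySem.List.enumerate]
  | cons pc ap ih =>
    intro s d
    rw [PySem.List.enumerate_cons, List.filter_cons]
    by_cases h : family_members.contains (pvCanon pc.1) = true
    · simp only [h, if_pos, List.foldl_cons, ih]
    · simp only [Bool.not_eq_true] at h
      rw [List.foldl_cons]
      simp only [h, Bool.false_eq_true, if_false, ih]

-- ===== VERDICT (by name: the statement is the Claim_ definition above) =====
theorem find_family_paths_spec : Claim_equal_find_family_paths := by
  intro all_paths family_members _
  unfold Spec_find_family_paths
  unfold find_family_paths find_family_paths_alt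
  simp only [pv_index_getD, PySem.List.foldl_append_eq_flatMap, List.nil_append]
  set E := PySem.List.enumerate all_paths 0 with hE
  have hperm : ((PySem.List.dedup family_members).flatMap
      (fun m => E.filter (fun e => pvCanon e.2.1 == m))).Perm
      (E.filter (fun e => family_members.contains (pvCanon e.2.1))) := by
    have h1 := pv_flatMap_filter_perm (fun e => pvCanon e.2.1) E
      (PySem.List.dedup family_members) (PySem.List.nodup_dedup family_members)
    have h2 : E.filter (fun e => (PySem.List.dedup family_members).contains (pvCanon e.2.1))
        = E.filter (fun e => family_members.contains (pvCanon e.2.1)) := by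
      apply List.filter_congr
      intro a _
      rw [Bool.eq_iff_iff]
      simp [PySem.List.dedup_eq_ofList]
    exact h2 ▸ h1
  have hpair : (E.filter (fun e => family_members.contains (pvCanon e.2.1))).Pairwise
      (fun p q => p.1 < q.1) :=
    (PySem.List.pairwise_lt_enumerate all_paths 0).sublist List.filter_sublist
  rw [PySem.List.sorted_eq_of_perm_of_pairwise_lt _
      (E.filter (fun e => family_members.contains (pvCanon e.2.1))) (fun e => e.1)
      hperm.symm hpair]
  rw [pv_foldl_insert_filter]
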